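-- pv_equiv track=rewrite | github.com/ricemaster1/color-space-algorithms | algorithms/quantizers/src/bsp_partitioning.py | _channel_bounds
-- ===== SOURCE A (Python) =====
-- def _channel_bounds(pixels: list[tuple[int, int, int]], indices: list[int]) -> tuple[tuple[int, int], tuple[int, int], tuple[int, int]]:
--     r_min = g_min = b_min = 255
--     r_max = g_max = b_max = 0
--     for idx in indices:
--         r, g, b = pixels[idx]
--         if r < r_min:
--             r_min = r
--         if r > r_max:
--             r_max = r
--         if g < g_min:
--             g_min = g
--         if g > g_max:
--             g_max = g
--         if b < b_min:
--             b_min = b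
--         if b > b_max:
--             b_max = b
--     return (r_min, r_max), (g_min, g_max), (b_min, b_max)
-- ===== SOURCE B (Python) =====
-- def _channel_bounds(pixels: list[tuple[int, int, int]], indices: list[int]) -> tuple[tuple[int, int], tuple[int, int], tuple[int, int]]:
--     sel = [pixels[i] for i in indices]
--     rs = [p[0] for p in sel]
--     gs = [p[1] for p in sel]
--     bs = [p[2] for p in sel]
--     return (
--         (min([255, *rs]), max([0, *rs])),
--         (min([255, *gs]), max([0, *gs])),
--         (min([255, *bs]), max([0, *bs])),
--     )
-- ===== Notes on version B (the rewrite author's own statement) =====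
-- stated objective: idiomatic
-- what changed: Replaces the six-accumulator loop with comprehensions that gather the selected channel values and the min/max builtins seeded with 255/0 to reproduce the clamp and empty-input behaviour.
import Mathlib
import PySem

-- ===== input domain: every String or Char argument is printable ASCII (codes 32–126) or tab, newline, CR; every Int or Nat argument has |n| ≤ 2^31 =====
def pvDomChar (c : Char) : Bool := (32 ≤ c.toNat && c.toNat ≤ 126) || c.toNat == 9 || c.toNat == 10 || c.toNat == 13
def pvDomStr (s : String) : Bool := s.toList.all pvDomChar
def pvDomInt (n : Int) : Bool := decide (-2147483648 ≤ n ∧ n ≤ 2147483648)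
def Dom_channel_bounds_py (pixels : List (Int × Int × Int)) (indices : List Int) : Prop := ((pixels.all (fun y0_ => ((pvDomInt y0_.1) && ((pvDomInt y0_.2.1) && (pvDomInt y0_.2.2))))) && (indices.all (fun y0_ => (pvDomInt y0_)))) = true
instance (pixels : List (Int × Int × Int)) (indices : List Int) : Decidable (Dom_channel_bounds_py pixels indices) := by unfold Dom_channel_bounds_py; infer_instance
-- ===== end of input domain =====

-- B gathers the selected channel values with comprehensions and uses seeded min/max builtins
-- instead of A's six hand-maintained accumulators (idiomatic decomposition; same cost).


-- ===== PORT A =====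
-- one pass over indices, six running accumulators ((r_min,r_max),(g_min,g_max),(b_min,b_max));
-- pixels[idx] is pyGetD (total form; Pre_ puts every idx in range, matching Python's IndexError)
def channel_bounds_py (pixels : List (Int × Int × Int)) (indices : List Int) : (Int × Int) × (Int × Int) × (Int × Int) :=
  indices.foldl
    (fun (st : (Int × Int) × (Int × Int) × (Int × Int)) idx =>
      let p := PySem.List.pyGetD pixels idx (0, 0, 0)
      let r_min := if p.1 < st.1.1 then p.1 else st.1.1
      let r_max := if p.1 > st.1.2 then p.1 else st.1.2
      let g_min := if p.2.1 < st.2.1.1 then p.2.1 else st.2.1.1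
      let g_max := if p.2.1 > st.2.1.2 then p.2.1 else st.2.1.2
      let b_min := if p.2.2 < st.2.2.1 then p.2.2 else st.2.2.1
      let b_max := if p.2.2 > st.2.2.2 then p.2.2 else st.2.2.2
      ((r_min, r_max), (g_min, g_max), (b_min, b_max)))
    ((255, 0), (255, 0), (255, 0))

-- ===== PORT B =====
-- gather the selected pixels, project the three channels, min/max seeded with 255/0
def channel_bounds_py_alt (pixels : List (Int × Int × Int)) (indices : List Int) : (Int × Int) × (Int × Int) × (Int × Int) :=
  let sel := indices.map (fun i => PySem.List.pyGetD pixels i (0, 0, 0))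
  let rs := sel.map (fun p => p.1)
  let gs := sel.map (fun p => p.2.1)
  let bs := sel.map (fun p => p.2.2)
  ((rs.foldl min 255, rs.foldl max 0),
   (gs.foldl min 255, gs.foldl max 0),
   (bs.foldl min 255, bs.foldl max 0))

-- ===== PRECONDITION & SPEC =====
-- Python A raises IndexError when some idx is out of range for pixels; exactly those inputs are excluded.
def Pre_channel_bounds_py (pixels : List (Int × Int × Int)) (indices : List Int) : Prop :=
  ∀ i ∈ indices, PySem.Raise.InRange pixels.length i
instance (pixels : List (Int × Int × Int)) (indices : List Int) : Decidable (Pre_channel_bounds_py pixels indices) := by unfold Pre_channel_bounds_py; infer_instance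
def pvWitness_channel_bounds_py : (List (Int × Int × Int)) × List Int := ([(10, 200, 30), (5, 6, 7)], [0, 1, -1, 0])

def Spec_channel_bounds_py (pixels : List (Int × Int × Int)) (indices : List Int) (out : (Int × Int) × (Int × Int) × (Int × Int)) : Prop := out = channel_bounds_py_alt pixels indices
instance (pixels : List (Int × Int × Int)) (indices : List Int) (out : (Int × Int) × (Int × Int) × (Int × Int)) : Decidable (Spec_channel_bounds_py pixels indices out) := by unfold Spec_channel_bounds_py; infer_instance

-- ===== CLAIM (what is proved, stated in full; the proofs are below) =====
def Claim_equal_channel_bounds_py : Prop := ∀ (pixels : List (Int × Int × Int)) (indices : List Int), Dom_channel_bounds_py pixels indices → Pre_channel_bounds_py pixels indices → Spec_channel_bounds_py pixels indices (channel_bounds_py pixels indices)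

-- ===== LEMMAS AND PROOFS =====
-- A's fold over indices, from ANY start state, computes exactly the seeded per-channel min/max folds.
theorem channel_bounds_fold (pixels : List (Int × Int × Int)) :
    ∀ (indices : List Int) (st : (Int × Int) × (Int × Int) × (Int × Int)),
      indices.foldl
        (fun (st : (Int × Int) × (Int × Int) × (Int × Int)) idx =>
          let p := PySem.List.pyGetD pixels idx (0, 0, 0)
          let r_min := if p.1 < st.1.1 then p.1 else st.1.1
          let r_max := if p.1 > st.1.2 then p.1 else st.1.2
          let g_min := if p.2.1 < st.2.1.1 then p.2.1 else st.2.1.1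
          let g_max := if p.2.1 > st.2.1.2 then p.2.1 else st.2.1.2
          let b_min := if p.2.2 < st.2.2.1 then p.2.2 else st.2.2.1
          let b_max := if p.2.2 > st.2.2.2 then p.2.2 else st.2.2.2
          ((r_min, r_max), (g_min, g_max), (b_min, b_max)))
        st
      =
      (let sel := indices.map (fun i => PySem.List.pyGetD pixels i (0, 0, 0))
       (((sel.map (fun p => p.1)).foldl min st.1.1, (sel.map (fun p => p.1)).foldl max st.1.2),
        ((sel.map (fun p => p.2.1)).foldl min st.2.1.1, (sel.map (fun p => p.2.1)).foldl max st.2.1.2),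
        ((sel.map (fun p => p.2.2)).foldl min st.2.2.1, (sel.map (fun p => p.2.2)).foldl max st.2.2.2))) := by
  intro indices
  induction indices with
  | nil => intro st; rfl
  | cons idx rest ih =>
      intro st
      simp only [List.foldl_cons, List.map_cons, ih]
      have h : ∀ a p : Int, (if p < a then p else a) = min a p := by intro a p; omega
      have h' : ∀ a p : Int, (if p > a then p else a) = max a p := by intro a p; omega
      simp [h, h']

theorem channel_bounds_py_spec : Claim_equal_channel_bounds_py := by
  intro pixels indices _ _
  unfold Spec_channel_bounds_py channel_bounds_py channel_bounds_py_alt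
  exact channel_bounds_fold pixels indices ((255, 0), (255, 0), (255, 0))
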